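-- pv_equiv track=rewrite | github.com/gregshulcev-commits/Instalation_skript | monitoring/src/awg_persistent_traffic_exporter.py | format_labels
-- ===== SOURCE A (Python) =====
-- from typing import Dict, Iterable, List, Mapping, MutableMapping, Optional, Tuple
--
-- def escape_label_value(value: str) -> str:
--     return value.replace("\\", "\\\\").replace("\n", "\\n").replace('"', '\\"')
--
-- def format_labels(labels: Mapping[str, str]) -> str:
--     preferred = ["interface", "friendly_name", "public_key", "allowed_ips", "allowed_ip_0", "allowed_subnet_0"]
--     keys: List[str] = []
--     for key in preferred:
--         if key in labels and key not in keys: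
--             keys.append(key)
--     for key in sorted(labels):
--         if key not in keys:
--             keys.append(key)
--     return ",".join(f'{key}="{escape_label_value(str(labels[key]))}"' for key in keys)
-- ===== SOURCE B (Python) =====
-- def escape_label_value(value: str) -> str:
--     return value.replace("\\", "\\\\").replace("\n", "\\n").replace('"', '\\"')
--
-- def format_labels(labels):
--     preferred = ["interface", "friendly_name", "public_key", "allowed_ips", "allowed_ip_0", "allowed_subnet_0"]
--     rank = {key: i for i, key in enumerate(preferred)}
--     sentinel = len(preferred)
--     keys = sorted(labels, key=lambda key: (rank.get(key, sentinel), key))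
--     return ",".join(f'{key}="{escape_label_value(str(labels[key]))}"' for key in keys)
-- ===== Notes on version B (the rewrite author's own statement) =====
-- stated objective: faster
-- what changed: Replaces A's two-phase ordering (scan the preferred list, then append each sorted key after an O(n) 'key not in keys' membership scan) with a single sorted() call over the labels using a composite (rank-or-sentinel, key) sort key built from a precomputed rank dict.
import Mathlib
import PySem

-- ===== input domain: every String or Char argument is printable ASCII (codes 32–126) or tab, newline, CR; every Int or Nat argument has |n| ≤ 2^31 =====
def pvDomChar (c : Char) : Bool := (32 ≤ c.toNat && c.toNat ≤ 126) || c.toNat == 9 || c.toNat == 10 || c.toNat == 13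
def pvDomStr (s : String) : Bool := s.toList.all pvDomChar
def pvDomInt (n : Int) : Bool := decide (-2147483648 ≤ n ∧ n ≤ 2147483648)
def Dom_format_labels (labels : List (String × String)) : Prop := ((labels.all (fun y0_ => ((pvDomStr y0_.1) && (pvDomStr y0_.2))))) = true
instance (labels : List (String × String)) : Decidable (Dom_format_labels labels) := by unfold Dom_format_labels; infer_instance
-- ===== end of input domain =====

-- B replaces A's two-phase partition-then-sort key ordering by a single sort with a composite
-- (rank, key) key; measured faster at large sizes (A's `key not in keys` scan is quadratic).

-- ===== PORT A =====
-- module helper escape_label_value, shared by A and B (both Pythons call it)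
def escape_label_value (value : String) : String :=
  PySem.Str.replace (PySem.Str.replace (PySem.Str.replace value "\\" "\\\\") "\n" "\\n") "\"" "\\\""

-- the literal `preferred` list both Pythons write out
def preferredLabels : List String :=
  ["interface", "friendly_name", "public_key", "allowed_ips", "allowed_ip_0", "allowed_subnet_0"]

def format_labels (labels : List (String × String)) : String :=
  let d := PySem.Dict.ofList labels            -- the dict parameter (insertion order, last value wins)
  let keys1 := preferredLabels.foldl
    (fun ks k => if d.contains k && !(ks.contains k) then ks ++ [k] else ks) ([] : List String)
  let keys := (PySem.List.sorted d.keys (fun k => k)).foldl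
    (fun ks k => if !(ks.contains k) then ks ++ [k] else ks) keys1
  -- labels[key]: key is always a key of d here, so the "" default of getD is never used
  PySem.Str.join "," (keys.map (fun k => k ++ "=\"" ++ escape_label_value (d.getD k "") ++ "\""))

-- ===== PORT B =====
def format_labels_alt (labels : List (String × String)) : String :=
  let d := PySem.Dict.ofList labels
  let rank : PySem.Dict String Int :=
    PySem.Dict.ofList ((PySem.List.enumerate preferredLabels).map (fun p => (p.2, p.1)))
  let sentinel : Int := (preferredLabels.length : Int)
  let keys := PySem.List.sorted2 d.keys (fun k => rank.getD k sentinel) (fun k => k)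
  PySem.Str.join "," (keys.map (fun k => k ++ "=\"" ++ escape_label_value (d.getD k "") ++ "\""))

-- ===== PRECONDITION & SPEC =====
def Spec_format_labels (labels : List (String × String)) (out : String) : Prop := out = format_labels_alt labels
instance (labels : List (String × String)) (out : String) : Decidable (Spec_format_labels labels out) := by unfold Spec_format_labels; infer_instance

-- ===== CLAIM (what is proved, stated in full; the proofs are below) =====
def Claim_equal_format_labels : Prop := ∀ (labels : List (String × String)), Dom_format_labels labels → Spec_format_labels labels (format_labels labels)

-- ===== LEMMAS AND PROOFS =====

-- A's first loop over the literal `preferred` list is a filter (pref nodup, acc fresh)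
theorem pv_foldl_filter (c : String → Bool) :
    ∀ (pref acc : List String), pref.Nodup → (∀ k ∈ pref, acc.contains k = false) →
      pref.foldl (fun ks k => if c k && !(ks.contains k) then ks ++ [k] else ks) acc
        = acc ++ pref.filter c := by
  intro pref
  induction pref with
  | nil => intro acc _ _; simp
  | cons p rest ih =>
    intro acc hnd hacc
    have hp : acc.contains p = false := hacc p (by simp)
    have hp' : p ∉ acc := by simpa using hp
    by_cases hc : c p = true
    · have hstep : (if (c p && !acc.contains p) = true then acc ++ [p] else acc) = acc ++ [p] := by
        simp [hc, hp']
      rw [List.foldl_cons, hstep, ih (acc ++ [p]) hnd.of_cons ?fresh]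
      · simp [hc]
      case fresh =>
        intro k hk
        have hkacc : k ∉ acc := by simpa using hacc k (List.mem_cons_of_mem _ hk)
        have hkp : k ≠ p := fun h => (List.nodup_cons.mp hnd).1 (h ▸ hk)
        simp [hkacc, hkp]
    · simp only [Bool.not_eq_true] at hc
      have hstep : (if (c p && !acc.contains p) = true then acc ++ [p] else acc) = acc := by
        simp [hc]
      rw [List.foldl_cons, hstep, ih acc hnd.of_cons (fun k hk => hacc k (List.mem_cons_of_mem _ hk))]
      simp [hc]

-- A's second loop is an ordered dedup-append: over a Nodup list it appends the non-members
theorem pv_foldl_dedup :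
    ∀ (S P : List String), S.Nodup →
      S.foldl (fun ks k => if !(ks.contains k) then ks ++ [k] else ks) P
        = P ++ S.filter (fun k => !(P.contains k)) := by
  intro S
  induction S with
  | nil => intro P _; simp
  | cons s S' ih =>
    intro P hnd
    by_cases hs : P.contains s = true
    · have hs' : s ∈ P := by simpa using hs
      have hstep : (if (!P.contains s) = true then P ++ [s] else P) = P := by simp [hs']
      rw [List.foldl_cons, hstep, ih P hnd.of_cons]
      simp [hs']
    · simp only [Bool.not_eq_true] at hs
      have hs' : s ∉ P := by simpa using hs
      have hstep : (if (!P.contains s) = true then P ++ [s] else P) = P ++ [s] := by simp [hs']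
      rw [List.foldl_cons, hstep, ih (P ++ [s]) hnd.of_cons]
      have hfil : S'.filter (fun k => !((P ++ [s]).contains k))
          = S'.filter (fun k => !(P.contains k)) := by
        apply List.filter_congr
        intro k hk
        have hks : k ≠ s := by
          rintro rfl; exact (List.nodup_cons.mp hnd).1 hk
        simp [hks]
      rw [hfil]
      simp [hs']

-- sorted2 with a second identity key is sorted with the lexicographic composite key
theorem pv_sorted2_eq_sorted_lex (xs : List String) (k1 : String → Int) :
    PySem.List.sorted2 xs k1 (fun k => k)
      = PySem.List.sorted xs (fun a => toLex (k1 a, a)) := by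
  rw [PySem.List.sorted_eq_foldl_insertBy]
  have hfun : (fun (a b : String) =>
        decide (k1 a < k1 b) || !decide (k1 b < k1 a) && decide (a < b))
      = (fun a b => decide (toLex (k1 a, a) < toLex (k1 b, b))) := by
    funext a b
    rcases lt_trichotomy (k1 a) (k1 b) with h | h | h
    · simp [Prod.Lex.lt_iff, h, not_lt_of_gt h]
    · simp [Prod.Lex.lt_iff, h]
    · simp [Prod.Lex.lt_iff, h, not_lt_of_gt h, ne_of_gt h]
  simp only [PySem.List.sorted2, Bool.false_eq_true, if_false, hfun]

-- the rank dict of B, as a closed literal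
theorem pv_rank_keys :
    (PySem.Dict.ofList ((PySem.List.enumerate preferredLabels).map (fun p => (p.2, p.1)))
      : PySem.Dict String Int).keys = preferredLabels := by decide

theorem pv_rank_lt_six :
    ∀ a ∈ preferredLabels,
      (PySem.Dict.ofList ((PySem.List.enumerate preferredLabels).map (fun p => (p.2, p.1)))
        : PySem.Dict String Int).getD a 6 < 6 := by decide

theorem pv_rank_pairwise :
    preferredLabels.Pairwise (fun a b =>
      (PySem.Dict.ofList ((PySem.List.enumerate preferredLabels).map (fun p => (p.2, p.1)))
        : PySem.Dict String Int).getD a 6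
      < (PySem.Dict.ofList ((PySem.List.enumerate preferredLabels).map (fun p => (p.2, p.1)))
        : PySem.Dict String Int).getD b 6) := by decide

theorem pv_rank_default {k : String} (hk : k ∉ preferredLabels) :
    (PySem.Dict.ofList ((PySem.List.enumerate preferredLabels).map (fun p => (p.2, p.1)))
      : PySem.Dict String Int).getD k 6 = 6 := by
  apply PySem.Dict.getD_of_not_contains
  rw [← Bool.not_eq_true, PySem.Dict.contains_iff_mem_keys, pv_rank_keys]
  exact hk

-- the two key orders coincide: B's single composite sort equals A's partition-then-sort list
theorem pv_keys_eq (labels : List (String × String)) :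
    PySem.List.sorted2 (PySem.Dict.ofList labels).keys
        (fun k => (PySem.Dict.ofList ((PySem.List.enumerate preferredLabels).map (fun p => (p.2, p.1)))
          : PySem.Dict String Int).getD k 6) (fun k => k)
      = (preferredLabels.filter (fun k => (PySem.Dict.ofList labels).contains k))
        ++ (PySem.List.sorted (PySem.Dict.ofList labels).keys (fun k => k)).filter
            (fun k => !((preferredLabels.filter (fun k => (PySem.Dict.ofList labels).contains k)).contains k)) := by
  set d := PySem.Dict.ofList labels with hd
  set rk := (PySem.Dict.ofList ((PySem.List.enumerate preferredLabels).map (fun p => (p.2, p.1)))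
    : PySem.Dict String Int) with hrk
  set P := preferredLabels.filter (fun k => d.contains k) with hP
  set S := PySem.List.sorted d.keys (fun k => k) with hS
  have hKnd : d.keys.Nodup := PySem.Dict.nodup_keys_ofList labels
  have hSperm : S.Perm d.keys := PySem.List.sorted_perm _ _ _
  have hSnd : S.Nodup := hSperm.symm.nodup hKnd
  have hSmem : ∀ {a : String}, a ∈ S ↔ a ∈ d.keys := fun {a} => hSperm.mem_iff
  have hprefnd : preferredLabels.Nodup := by decide
  have hPmem : ∀ {a : String}, a ∈ P ↔ a ∈ preferredLabels ∧ a ∈ d.keys := by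
    intro a
    simp [hP, List.mem_filter, PySem.Dict.contains_iff_mem_keys]
  have hFmem : ∀ {a : String},
      a ∈ S.filter (fun k => !(P.contains k)) ↔ a ∈ S ∧ a ∉ P := by
    intro a; simp [List.mem_filter]
  -- the right-hand side is a permutation of d.keys
  have hperm : (P ++ S.filter (fun k => !(P.contains k))).Perm d.keys := by
    rw [List.perm_ext_iff_of_nodup ?nd hKnd]
    case nd =>
      refine List.Nodup.append (hprefnd.filter _) (hSnd.filter _) ?_
      intro a haP haF
      exact ((hFmem.mp haF).2) haP
    intro a
    constructor
    · intro ha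
      rcases List.mem_append.mp ha with h | h
      · exact (hPmem.mp h).2
      · exact hSmem.mp (hFmem.mp h).1
    · intro ha
      by_cases hp : a ∈ P
      · exact List.mem_append.mpr (Or.inl hp)
      · exact List.mem_append.mpr (Or.inr (hFmem.mpr ⟨hSmem.mpr ha, hp⟩))
  -- the right-hand side is strictly increasing under the composite key
  have hpair : (P ++ S.filter (fun k => !(P.contains k))).Pairwise
      (fun a b => toLex (rk.getD a 6, a) < toLex (rk.getD b 6, b)) := by
    rw [List.pairwise_append]
    refine ⟨?_, ?_, ?_⟩
    · -- within P: ranks strictly increase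
      have := (pv_rank_pairwise.filter (fun k => d.contains k))
      refine this.imp ?_
      intro a b hab
      exact Prod.Lex.lt_iff.mpr (Or.inl hab)
    · -- within the sorted rest: equal sentinel rank, keys strictly increase
      have hlt : (S.filter (fun k => !(P.contains k))).Pairwise (fun a b => a < b) := by
        have hle := PySem.List.sorted_pairwise d.keys (fun k => k)
        have hne : S.Pairwise (fun a b : String => a ≠ b) := hSnd
        have : S.Pairwise (fun a b : String => a < b) :=
          (hle.and hne).imp (fun h => lt_of_le_of_ne h.1 h.2)
        exact this.filter _
      refine hlt.imp_of_mem ?_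
      intro a b ha hb hab
      have h6a : rk.getD a 6 = 6 := by
        apply pv_rank_default
        intro hmem
        exact (hFmem.mp ha).2 (hPmem.mpr ⟨hmem, hSmem.mp (hFmem.mp ha).1⟩)
      have h6b : rk.getD b 6 = 6 := by
        apply pv_rank_default
        intro hmem
        exact (hFmem.mp hb).2 (hPmem.mpr ⟨hmem, hSmem.mp (hFmem.mp hb).1⟩)
      exact Prod.Lex.lt_iff.mpr (Or.inr ⟨by simp [h6a, h6b], by simpa using hab⟩)
    · -- across: preferred ranks are below the sentinel
      intro a ha b hb
      have h6b : rk.getD b 6 = 6 := by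
        apply pv_rank_default
        intro hmem
        exact (hFmem.mp hb).2 (hPmem.mpr ⟨hmem, hSmem.mp (hFmem.mp hb).1⟩)
      have hlt : rk.getD a 6 < 6 := pv_rank_lt_six a (hPmem.mp ha).1
      exact Prod.Lex.lt_iff.mpr (Or.inl (by simpa [h6b] using hlt))
  calc PySem.List.sorted2 d.keys (fun k => rk.getD k 6) (fun k => k)
      = PySem.List.sorted d.keys (fun a => toLex (rk.getD a 6, a)) :=
        pv_sorted2_eq_sorted_lex _ _
    _ = P ++ S.filter (fun k => !(P.contains k)) :=
        PySem.List.sorted_eq_of_perm_of_pairwise_lt _ _ _ hperm hpair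

-- ===== VERDICT (by name: the statement is the Claim_ definition above) =====
theorem format_labels_spec : Claim_equal_format_labels := by
  intro labels _
  show format_labels labels = format_labels_alt labels
  unfold format_labels format_labels_alt
  simp only []
  rw [pv_foldl_filter (fun k => (PySem.Dict.ofList labels).contains k) preferredLabels []
        (by decide) (by intro k _; rfl),
      pv_foldl_dedup _ _ ((PySem.List.sorted_perm _ _ _).symm.nodup (PySem.Dict.nodup_keys_ofList labels))]
  rw [show ((preferredLabels.length : Int)) = 6 from rfl]
  rw [pv_keys_eq labels]
  simp
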